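-- pv_equiv track=rewrite | github.com/jebreimo/Argen | Argen2/argument.py | split_on_commas
-- ===== SOURCE A (Python) =====
-- def find_commas(text):
--     commas = []
--     pos = 0
--     while True:
--         pos = text.find(",", pos)
--         if pos == -1:
--             break
--         if pos == len(text) - 1 or text[pos + 1] in " \t-/":
--             commas.append(pos)
--         pos += 1
--     return commas
--
-- def split_on_commas(text):
--     pos = 0
--     parts = []
--     for commaPos in find_commas(text):
--         if pos != commaPos:
--             parts.append(text[pos:commaPos])
--         pos = commaPos + 1
--     if pos != len(text):
--         parts.append(text[pos:])
--     return parts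
-- ===== SOURCE B (Python) =====
-- def split_on_commas(text):
--     parts = []
--     buf = ""
--     n = len(text)
--     for i, ch in enumerate(text):
--         if ch == "," and (i == n - 1 or text[i + 1] in " \t-/"):
--             if buf:
--                 parts.append(buf)
--             buf = ""
--         else:
--             buf += ch
--     if buf:
--         parts.append(buf)
--     return parts
-- ===== Notes on version B (the rewrite author's own statement) =====
-- stated objective: simpler
-- what changed: Replaced the two-phase algorithm (a repeated str.find scan collecting comma indices, then a second loop slicing the text at those indices) by a single left-to-right character scan that accumulates a buffer and flushes it at qualifying commas.
import Mathlib
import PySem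

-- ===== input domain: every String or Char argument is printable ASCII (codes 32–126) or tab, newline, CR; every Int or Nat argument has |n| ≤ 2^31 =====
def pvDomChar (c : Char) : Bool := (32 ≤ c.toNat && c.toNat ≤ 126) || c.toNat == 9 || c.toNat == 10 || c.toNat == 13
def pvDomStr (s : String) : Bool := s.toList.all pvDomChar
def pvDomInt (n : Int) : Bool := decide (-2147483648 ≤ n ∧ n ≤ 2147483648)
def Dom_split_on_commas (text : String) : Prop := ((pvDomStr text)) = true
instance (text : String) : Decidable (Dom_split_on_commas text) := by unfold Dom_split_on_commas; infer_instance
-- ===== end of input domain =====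

-- B is a single left-to-right character scan with a buffer (one pass, no position
-- bookkeeping or slicing), replacing A's repeated `find`-for-commas plus slice loop;
-- objective: simpler. Equivalence is about the return value; neither mutates input.

-- ===== PORT A =====
-- helper: port of find_commas's while loop (fuel makes the same computation total;
-- each iteration strictly increases pos, so cs.length + 1 iterations always suffice)
def findCommasAux (cs : List Char) (fuel : Nat) (pos : Nat) : List Nat :=
  match fuel with
  | 0 => []
  | fuel + 1 =>
    let f := PySem.Chars.findFrom cs [','] (pos : Int) none
    if f = -1 then []
    else
      let p := f.toNat
      if p = cs.length - 1 ∨ (PySem.List.pyGet? cs ((p : Int) + 1)).any (· ∈ [' ', '\t', '-', '/'])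
      then p :: findCommasAux cs fuel (p + 1)
      else findCommasAux cs fuel (p + 1)

def findCommas (cs : List Char) : List Nat := findCommasAux cs (cs.length + 1) 0

def split_on_commas (text : String) : List String :=
  let cs := text.toList
  let st := (findCommas cs).foldl
    (fun (st : Nat × List (List Char)) commaPos =>
      (commaPos + 1,
       if st.1 ≠ commaPos
       then st.2 ++ [PySem.List.slice cs (some (st.1 : Int)) (some (commaPos : Int))]
       else st.2))
    (0, [])
  (if st.1 ≠ cs.length then st.2 ++ [PySem.List.slice cs (some (st.1 : Int)) none] else st.2).map
    String.ofList

-- ===== PORT B =====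
def split_on_commas_alt (text : String) : List String :=
  let cs := text.toList
  let n := cs.length
  let st := (PySem.List.enumerate cs).foldl
    (fun (st : List (List Char) × List Char) p =>
      if p.2 = ',' ∧ (p.1 = (n : Int) - 1 ∨ (PySem.List.pyGet? cs (p.1 + 1)).any (· ∈ [' ', '\t', '-', '/']))
      then (if st.2 ≠ [] then st.1 ++ [st.2] else st.1, [])
      else (st.1, st.2 ++ [p.2]))
    ([], [])
  (if st.2 ≠ [] then st.1 ++ [st.2] else st.1).map String.ofList

-- ===== PRECONDITION & SPEC =====
def Spec_split_on_commas (text : String) (out : List String) : Prop := out = split_on_commas_alt text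
instance (text : String) (out : List String) : Decidable (Spec_split_on_commas text out) := by unfold Spec_split_on_commas; infer_instance

-- ===== CLAIM (what is proved, stated in full; the proofs are below) =====
def Claim_equal_split_on_commas : Prop := ∀ (text : String), Dom_split_on_commas text → Spec_split_on_commas text (split_on_commas text)

-- ===== LEMMAS AND PROOFS =====

-- a position i "qualifies": a comma followed by end-of-string or one of " \t-/"
def qualB (cs : List Char) (i : Nat) : Bool :=
  (cs[i]? == some ',') &&
    (decide (i = cs.length - 1) || (cs[i + 1]?.any (· ∈ [' ', '\t', '-', '/'])))

-- the qualifying positions ≥ pos, in increasing order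
def qualList (cs : List Char) (pos : Nat) : List Nat :=
  if h : pos < cs.length then
    (if qualB cs pos then [pos] else []) ++ qualList cs (pos + 1)
  else []
termination_by cs.length - pos

-- reference splitter: segments of cs from position k, current buffer buf
def segsRec (cs : List Char) (buf : List Char) (k : Nat) : List (List Char) :=
  if h : k < cs.length then
    if qualB cs k then (if buf = [] then [] else [buf]) ++ segsRec cs [] (k + 1)
    else segsRec cs (buf ++ [cs[k]]) (k + 1)
  else if buf = [] then [] else [buf]
termination_by cs.length - k

-- A's part-building from a comma-position list, segment start s
def buildParts (cs : List Char) (ql : List Nat) (s : Nat) : List (List Char) :=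
  match ql with
  | [] => if s = cs.length then [] else [cs.drop s]
  | q :: rest => (if s = q then [] else [(cs.drop s).take (q - s)]) ++ buildParts cs rest (q + 1)

theorem qualList_of_no_comma (cs : List Char) (pos : Nat)
    (h : ∀ i, pos ≤ i → cs[i]? ≠ some ',') : qualList cs pos = [] := by
  unfold qualList
  split
  · have hq : qualB cs pos = false := by
      unfold qualB
      simp only [Bool.and_eq_false_iff]
      left
      simpa using h pos le_rfl
    rw [hq]
    simpa using qualList_of_no_comma cs (pos + 1) (fun i hi => h i (by omega))
  · rfl
termination_by cs.length - pos

theorem qualList_skip (cs : List Char) (pos q : Nat) (hpq : pos ≤ q)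
    (h : ∀ i, pos ≤ i → i < q → cs[i]? ≠ some ',') : qualList cs pos = qualList cs q := by
  rcases Nat.eq_or_lt_of_le hpq with rfl | hlt
  · rfl
  · by_cases hp : pos < cs.length
    · have hq : qualB cs pos = false := by
        unfold qualB
        simp only [Bool.and_eq_false_iff]
        left
        simpa using h pos le_rfl hlt
      rw [qualList, dif_pos hp, hq]
      simpa using qualList_skip cs (pos + 1) q hlt (fun i hi hi2 => h i (by omega) hi2)
    · have h1 : qualList cs pos = [] := by rw [qualList, dif_neg hp]
      have h2 : qualList cs q = [] := by
        rw [qualList, dif_neg (by omega : ¬ q < cs.length)]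
      rw [h1, h2]
termination_by q - pos

theorem singleton_prefix_iff (a : Char) (l : List Char) : [a] <+: l ↔ l.head? = some a := by
  cases l with
  | nil => simp
  | cons b t =>
    constructor
    · rintro ⟨u, hu⟩
      simp at hu
      simp [hu.1]
    · intro h
      simp at h
      exact ⟨t, by simp [h]⟩

theorem findCommasAux_eq (cs : List Char) (fuel pos : Nat)
    (hpos : pos ≤ cs.length) (hfuel : cs.length + 1 ≤ fuel + pos) :
    findCommasAux cs fuel pos = qualList cs pos := by
  induction fuel generalizing pos with
  | zero =>
    have : pos = cs.length := by omega
    subst this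
    rw [findCommasAux, qualList]
    simp
  | succ fuel ih =>
    by_cases hf : PySem.Chars.find (cs.drop pos) [','] = -1
    · have hneg : PySem.Chars.findFrom cs [','] (pos : Int) none = -1 := by
        rw [PySem.Chars.findFrom_natCast cs [','] pos hpos, if_pos hf]
      simp only [findCommasAux, hneg, reduceIte]
      rw [qualList_of_no_comma]
      intro i hi hcomma
      rw [PySem.Chars.find_eq_neg_one_iff] at hf
      apply hf
      have hpre : [','] <+: cs.drop i := by
        rw [singleton_prefix_iff, List.head?_drop, hcomma]
      have hdd : cs.drop i = (cs.drop pos).drop (i - pos) := by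
        rw [List.drop_drop]
        congr 1
        omega
      rw [hdd] at hpre
      exact hpre.isInfix.trans (List.IsSuffix.isInfix (List.drop_suffix _ _))
    · have hnn : 0 ≤ PySem.Chars.find (cs.drop pos) [','] := by
        rcases PySem.Chars.neg_one_le_find (cs.drop pos) [','] |>.lt_or_eq with h | h
        · omega
        · exact absurd h.symm hf
      set j : Nat := (PySem.Chars.find (cs.drop pos) [',']).toNat with hj
      have hspec := PySem.Chars.find_spec (s := cs.drop pos) (sub := [',']) hnn
      have hjlen : j < (cs.drop pos).length := by
        rcases hspec.1 with ⟨u, hu⟩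
        have := congrArg List.length hu
        simp [List.length_drop] at this ⊢
        omega
      have hjlen' : pos + j < cs.length := by simp [List.length_drop] at hjlen; omega
      have hfr : PySem.Chars.findFrom cs [','] (pos : Int) none = ((pos + j : Nat) : Int) := by
        rw [PySem.Chars.findFrom_natCast cs [','] pos hpos, if_neg hf]
        push_cast
        omega
      have hne : ¬ (((pos + j : Nat) : Int) = -1) := by omega
      simp only [findCommasAux, hfr, if_neg hne, Int.toNat_natCast]
      have hcomma : cs[pos + j]? = some ',' := by
        have hp1 := hspec.1
        rw [singleton_prefix_iff, List.head?_drop] at hp1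
        rwa [List.getElem?_drop] at hp1
      have hskip : qualList cs pos = qualList cs (pos + j) := by
        apply qualList_skip cs pos (pos + j) (by omega)
        intro i hi hi2 hcomma'
        apply hspec.2 (i - pos) (by omega)
        rw [singleton_prefix_iff, List.head?_drop, List.getElem?_drop]
        rw [show pos + (i - pos) = i by omega]
        exact hcomma'
      rw [hskip]
      rw [qualList, dif_pos hjlen']
      have hrec : findCommasAux cs fuel (pos + j + 1) = qualList cs (pos + j + 1) :=
        ih (pos + j + 1) (by omega) (by omega)
      have hget : PySem.List.pyGet? cs ((↑(pos + j) : Int) + 1) = cs[pos + j + 1]? := by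
        have hcast : ((pos + j : Nat) : Int) + 1 = ((pos + j + 1 : Nat) : Int) := by push_cast; ring
        rw [hcast, PySem.List.pyGet?_natCast]
      simp only [hget]
      have hqb : qualB cs (pos + j) = true ↔
          (pos + j = cs.length - 1 ∨ (cs[pos + j + 1]?.any (· ∈ [' ', '\t', '-', '/']) = true)) := by
        unfold qualB
        simp [hcomma]
      by_cases hc : pos + j = cs.length - 1 ∨ (cs[pos + j + 1]?.any (· ∈ [' ', '\t', '-', '/']) = true)
      · rw [if_pos hc]
        have hq : qualB cs (pos + j) = true := hqb.mpr hc
        rw [hq, hrec]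
        simp
      · rw [if_neg hc]
        have hq : qualB cs (pos + j) = false := by
          rcases Bool.eq_false_or_eq_true (qualB cs (pos + j)) with h | h
          · exact absurd (hqb.mp h) hc
          · exact h
        rw [hq, hrec]
        simp

-- A's foldl over a comma list, plus the final tail append, equals buildParts
theorem foldA_eq (cs : List Char) (ql : List Nat) (s : Nat) (parts : List (List Char)) :
    (if (ql.foldl
        (fun (st : Nat × List (List Char)) commaPos =>
          (commaPos + 1,
           if st.1 ≠ commaPos
           then st.2 ++ [PySem.List.slice cs (some (st.1 : Int)) (some (commaPos : Int))]
           else st.2))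
        (s, parts)).1 ≠ cs.length
     then (ql.foldl
        (fun (st : Nat × List (List Char)) commaPos =>
          (commaPos + 1,
           if st.1 ≠ commaPos
           then st.2 ++ [PySem.List.slice cs (some (st.1 : Int)) (some (commaPos : Int))]
           else st.2))
        (s, parts)).2 ++ [PySem.List.slice cs (some (((ql.foldl
        (fun (st : Nat × List (List Char)) commaPos =>
          (commaPos + 1,
           if st.1 ≠ commaPos
           then st.2 ++ [PySem.List.slice cs (some (st.1 : Int)) (some (commaPos : Int))]
           else st.2))
        (s, parts)).1 : Nat) : Int)) none]
     else (ql.foldl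
        (fun (st : Nat × List (List Char)) commaPos =>
          (commaPos + 1,
           if st.1 ≠ commaPos
           then st.2 ++ [PySem.List.slice cs (some (st.1 : Int)) (some (commaPos : Int))]
           else st.2))
        (s, parts)).2)
      = parts ++ buildParts cs ql s := by
  induction ql generalizing s parts with
  | nil =>
    simp only [List.foldl_nil, buildParts]
    rw [PySem.List.slice_from_natCast]
    by_cases h : s = cs.length <;> simp [h]
  | cons q rest ih =>
    simp only [List.foldl_cons, buildParts]
    rw [ih (q + 1)]
    rw [PySem.List.slice_natCast]
    by_cases h : s = q <;> simp [h]

-- B's foldl over the enumerated suffix, plus the final buffer flush, equals segsRec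
theorem foldB_eq (cs : List Char) (k : Nat) (parts : List (List Char)) (buf : List Char)
    (hk : k ≤ cs.length) :
    (if ((PySem.List.enumerate (cs.drop k) k).foldl
        (fun (st : List (List Char) × List Char) p =>
          if p.2 = ',' ∧ (p.1 = (cs.length : Int) - 1 ∨ (PySem.List.pyGet? cs (p.1 + 1)).any (· ∈ [' ', '\t', '-', '/']))
          then (if st.2 ≠ [] then st.1 ++ [st.2] else st.1, [])
          else (st.1, st.2 ++ [p.2]))
        (parts, buf)).2 ≠ []
     then ((PySem.List.enumerate (cs.drop k) k).foldl
        (fun (st : List (List Char) × List Char) p =>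
          if p.2 = ',' ∧ (p.1 = (cs.length : Int) - 1 ∨ (PySem.List.pyGet? cs (p.1 + 1)).any (· ∈ [' ', '\t', '-', '/']))
          then (if st.2 ≠ [] then st.1 ++ [st.2] else st.1, [])
          else (st.1, st.2 ++ [p.2]))
        (parts, buf)).1 ++ [((PySem.List.enumerate (cs.drop k) k).foldl
        (fun (st : List (List Char) × List Char) p =>
          if p.2 = ',' ∧ (p.1 = (cs.length : Int) - 1 ∨ (PySem.List.pyGet? cs (p.1 + 1)).any (· ∈ [' ', '\t', '-', '/']))
          then (if st.2 ≠ [] then st.1 ++ [st.2] else st.1, [])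
          else (st.1, st.2 ++ [p.2]))
        (parts, buf)).2]
     else ((PySem.List.enumerate (cs.drop k) k).foldl
        (fun (st : List (List Char) × List Char) p =>
          if p.2 = ',' ∧ (p.1 = (cs.length : Int) - 1 ∨ (PySem.List.pyGet? cs (p.1 + 1)).any (· ∈ [' ', '\t', '-', '/']))
          then (if st.2 ≠ [] then st.1 ++ [st.2] else st.1, [])
          else (st.1, st.2 ++ [p.2]))
        (parts, buf)).1)
      = parts ++ segsRec cs buf k := by
  by_cases h : k < cs.length
  · have hdrop : cs.drop k = cs[k] :: cs.drop (k + 1) := by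
      rw [List.drop_eq_getElem_cons h]
    rw [hdrop, PySem.List.enumerate_cons, List.foldl_cons]
    have hcond : (cs[k] = ',' ∧ ((k : Int) = (cs.length : Int) - 1 ∨
        (PySem.List.pyGet? cs ((k : Int) + 1)).any (· ∈ [' ', '\t', '-', '/']))) ↔ qualB cs k = true := by
      unfold qualB
      have hget : cs[k]? = some cs[k] := List.getElem?_eq_getElem h
      have hcast : ((k : Int) + 1) = ((k + 1 : Nat) : Int) := by push_cast; ring
      have hiff : ((k : Int) = (cs.length : Int) - 1) ↔ (k = cs.length - 1) := by omega
      rw [hcast, PySem.List.pyGet?_natCast]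
      simp [hget, hiff]
    rw [segsRec, dif_pos h]
    by_cases hq : qualB cs k = true
    · rw [hq]
      simp only [if_true]
      rw [if_pos (hcond.mpr hq)]
      have hrec := foldB_eq cs (k + 1) (if buf ≠ [] then parts ++ [buf] else parts) [] (by omega)
      simp only [show (k : Int) + 1 = ((k + 1 : Nat) : Int) by push_cast; ring] at hrec ⊢
      rw [hrec]
      by_cases hb : buf = [] <;> simp [hb]
    · have hqf : qualB cs k = false := by simpa using hq
      rw [hqf]
      simp only [Bool.false_eq_true, if_false]
      rw [if_neg (fun hc => hq (hcond.mp hc))]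
      have hrec := foldB_eq cs (k + 1) parts (buf ++ [cs[k]]) (by omega)
      simp only [show (k : Int) + 1 = ((k + 1 : Nat) : Int) by push_cast; ring] at hrec ⊢
      rw [hrec]
  · have hkn : k = cs.length := by omega
    rw [List.drop_eq_nil_of_le (by omega), PySem.List.enumerate_nil, List.foldl_nil]
    rw [segsRec, dif_neg h]
    by_cases hb : buf = [] <;> simp [hb]
termination_by cs.length - k

-- the bridge: segsRec with buffer cs[s:k] equals buildParts over the qualifying positions ≥ k
theorem segsRec_eq_buildParts (cs : List Char) (k s : Nat) (hs : s ≤ k) (hk : k ≤ cs.length) :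
    segsRec cs ((cs.drop s).take (k - s)) k = buildParts cs (qualList cs k) s := by
  have hbuf_len : ((cs.drop s).take (k - s)).length = k - s := by
    simp [List.length_take, List.length_drop]
    omega
  by_cases h : k < cs.length
  · rw [segsRec, dif_pos h]
    rw [qualList, dif_pos h]
    by_cases hq : qualB cs k = true
    · rw [if_pos hq, if_pos hq]
      simp only [List.singleton_append]
      have hrec := segsRec_eq_buildParts cs (k + 1) (k + 1) le_rfl (by omega)
      simp only [Nat.sub_self, List.take_zero] at hrec
      rw [hrec]
      rw [show buildParts cs (k :: qualList cs (k + 1)) s =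
            (if s = k then [] else [(cs.drop s).take (k - s)]) ++
              buildParts cs (qualList cs (k + 1)) (k + 1) from rfl]
      have hnil : ((cs.drop s).take (k - s) = []) ↔ (s = k) := by
        rw [← List.length_eq_zero_iff, hbuf_len]
        omega
      by_cases hsk : s = k
      · rw [if_pos (hnil.mpr hsk), if_pos hsk]
      · rw [if_neg (fun hc => hsk (hnil.mp hc)), if_neg hsk]
    · rw [if_neg hq]
      have hbool : qualB cs k = false := by simpa using hq
      rw [hbool]
      simp only [Bool.false_eq_true, if_false, List.nil_append]
      have hgrow : (cs.drop s).take (k - s) ++ [cs[k]] = (cs.drop s).take (k + 1 - s) := by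
        have h1 : k + 1 - s = (k - s) + 1 := by omega
        rw [h1, List.take_add_one]
        have h2 : (cs.drop s)[k - s]? = some cs[k] := by
          rw [List.getElem?_drop]
          rw [show s + (k - s) = k by omega]
          exact List.getElem?_eq_getElem h
        simp [h2]
      rw [hgrow]
      exact segsRec_eq_buildParts cs (k + 1) s (by omega) (by omega)
  · have hkn : k = cs.length := by omega
    rw [segsRec, dif_neg h]
    rw [qualList, dif_neg h]
    simp only [buildParts]
    have hfull : (cs.drop s).take (k - s) = cs.drop s := by
      apply List.take_of_length_le
      simp [List.length_drop]
      omega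
    rw [hfull]
    have hnil : (cs.drop s = []) ↔ (s = cs.length) := by
      rw [List.drop_eq_nil_iff]
      omega
    by_cases hsk : s = cs.length
    · rw [if_pos (hnil.mpr hsk), if_pos hsk]
    · rw [if_neg (fun hc => hsk (hnil.mp hc)), if_neg hsk]
termination_by cs.length - k

-- ===== VERDICT (by name: the statement is the Claim_ definition above) =====
theorem split_on_commas_spec : Claim_equal_split_on_commas := by
  intro text _
  unfold Spec_split_on_commas split_on_commas split_on_commas_alt findCommas
  simp only []
  rw [findCommasAux_eq text.toList (text.toList.length + 1) 0 (by omega) (by omega)]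
  rw [foldA_eq text.toList (qualList text.toList 0) 0 []]
  have hB := foldB_eq text.toList 0 [] [] (by omega)
  simp only [List.drop_zero, Nat.cast_zero] at hB
  rw [hB]
  have hbr := segsRec_eq_buildParts text.toList 0 0 le_rfl (by omega)
  simp only [Nat.sub_self, List.take_zero] at hbr
  rw [hbr]
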